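-- pv_equiv track=rewrite | github.com/ship-escapees/coding-test | soyeong/programmers-2/스킬트리.py | solution
-- ===== SOURCE A (Python) =====
-- def solution(skill, skill_trees):
--     answer = 0
--     for tree in skill_trees:
--         s = ''
--         for i in tree:
--             # 스킬트리안 스킬을 선행스킬과 관련된 것만으로 정리하는 과정
--             # (여기서 스킬 트리와 상관 없이 배울 수 있는 스킬은 검증 대상에서 제외되고 해당 스킬들만 정리)
--             if i in skill:
--                 s += i
--
--         # 선행 스킬에서 정리된 스킬트리와 대조했을때 같다면 습득 가능한 스킬트리 이므로 +1
--         if skill[:len(s)] == s: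
--             answer += 1
--
--     return answer
-- ===== SOURCE B (Python) =====
-- def solution(skill, skill_trees):
--     skills = set(skill)
--     answer = 0
--     for tree in skill_trees:
--         idx = 0
--         ok = True
--         for c in tree:
--             if c in skills:
--                 if idx >= len(skill) or c != skill[idx]:
--                     ok = False
--                     break
--                 idx += 1
--         if ok:
--             answer += 1
--     return answer
-- ===== Notes on version B (the rewrite author's own statement) =====
-- stated objective: faster
-- what changed: Instead of building a filtered string per tree and then slice-comparing it with skill's prefix, B keeps a single index into skill and checks each relevant character against skill[idx] in one short-circuiting pass with no intermediate string.
import Mathlib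
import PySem

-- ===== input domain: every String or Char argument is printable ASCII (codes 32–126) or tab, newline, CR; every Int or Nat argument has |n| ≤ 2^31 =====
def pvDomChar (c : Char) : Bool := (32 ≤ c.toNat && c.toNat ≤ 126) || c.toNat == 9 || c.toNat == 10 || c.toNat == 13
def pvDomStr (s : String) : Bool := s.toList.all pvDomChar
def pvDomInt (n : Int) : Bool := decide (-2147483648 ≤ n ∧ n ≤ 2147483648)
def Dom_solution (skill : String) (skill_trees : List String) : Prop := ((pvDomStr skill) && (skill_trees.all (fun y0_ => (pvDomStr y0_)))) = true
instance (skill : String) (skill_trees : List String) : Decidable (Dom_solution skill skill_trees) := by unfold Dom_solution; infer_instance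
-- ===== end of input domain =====

-- ===== PORT A =====
-- B interleaves A's two phases (filter then prefix-compare) into one indexed scan; same return value, alternative decomposition.
-- A: build the filtered string s (chars of tree that occur in skill), then compare skill[:len(s)] with s.
-- skill[:len(s)] with len(s) ≥ 0 is exactly List.take.
def solution (skill : String) (skill_trees : List String) : Int :=
  skill_trees.foldl (fun answer tree =>
    let s := tree.toList.foldl (fun s i => if skill.toList.contains i then s ++ [i] else s) ([] : List Char)
    if skill.toList.take s.length = s then answer + 1 else answer) 0

-- ===== PORT B =====
-- B's inner loop: walk tree once keeping an index idx into skill; a skill char must equal skill[idx].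
def altCheck (skill : List Char) (skills : PySem.Set Char) : Nat → List Char → Bool
  | _, [] => true
  | idx, c :: rest =>
    if PySem.Set.contains skills c then
      match skill[idx]? with
      | some d => if c = d then altCheck skill skills (idx + 1) rest else false
      | none => false
    else altCheck skill skills idx rest

def solution_alt (skill : String) (skill_trees : List String) : Int :=
  let skills := PySem.Set.ofList skill.toList
  skill_trees.foldl (fun answer tree =>
    if altCheck skill.toList skills 0 tree.toList then answer + 1 else answer) 0

-- ===== PRECONDITION & SPEC =====
def Spec_solution (skill : String) (skill_trees : List String) (out : Int) : Prop := out = solution_alt skill skill_trees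
instance (skill : String) (skill_trees : List String) (out : Int) : Decidable (Spec_solution skill skill_trees out) := by unfold Spec_solution; infer_instance

-- ===== CLAIM (what is proved, stated in full; the proofs are below) =====
def Claim_equal_solution : Prop := ∀ (skill : String) (skill_trees : List String), Dom_solution skill skill_trees → Spec_solution skill skill_trees (solution skill skill_trees)

-- ===== LEMMAS AND PROOFS =====

theorem foldl_append_filter (p : Char → Bool) (t : List Char) :
    ∀ acc : List Char,
      t.foldl (fun s i => if p i then s ++ [i] else s) acc = acc ++ t.filter p := by
  induction t with
  | nil => intro acc; simp
  | cons c rest ih =>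
    intro acc
    by_cases hc : p c = true <;> simp [List.foldl, hc, ih]

theorem altCheck_eq (sk : List Char) (t : List Char) :
    ∀ idx : Nat,
      altCheck sk (PySem.Set.ofList sk) idx t
        = decide ((sk.drop idx).take (t.filter (fun c => sk.contains c)).length
                    = t.filter (fun c => sk.contains c)) := by
  induction t with
  | nil => intro idx; simp [altCheck]
  | cons c rest ih =>
    intro idx
    by_cases hc : c ∈ sk
    · by_cases hlt : idx < sk.length
      · have hdrop : sk.drop idx = sk[idx] :: sk.drop (idx + 1) :=
          List.drop_eq_getElem_cons hlt
        by_cases heq : c = sk[idx]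
        · rw [altCheck, List.getElem?_eq_getElem hlt, List.filter_cons]
          simp [hc, ih]
          rw [hdrop, List.take_succ_cons]
          simp [heq]
        · have hne : ¬ sk[idx] = c := fun h => heq h.symm
          rw [altCheck, List.getElem?_eq_getElem hlt, List.filter_cons]
          simp [hc, heq]
          rw [hdrop, List.take_succ_cons]
          simp [hne]
      · have hnone : sk[idx]? = none := by
          rw [List.getElem?_eq_none_iff]; omega
        have hdrop : sk.drop idx = [] := by
          rw [List.drop_eq_nil_iff]; omega
        rw [altCheck, hnone, List.filter_cons]
        simp [hc, hdrop]
    · rw [altCheck, List.filter_cons]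
      simp [hc, ih]

-- ===== VERDICT (by name: the statement is the Claim_ definition above) =====
theorem solution_spec : Claim_equal_solution := by
  intro skill skill_trees _
  unfold Spec_solution solution solution_alt
  have hfun :
      (fun (answer : Int) (tree : String) =>
        let s := tree.toList.foldl
          (fun s i => if skill.toList.contains i then s ++ [i] else s) ([] : List Char)
        if skill.toList.take s.length = s then answer + 1 else answer)
      = (fun (answer : Int) (tree : String) =>
        if altCheck skill.toList (PySem.Set.ofList skill.toList) 0 tree.toList
        then answer + 1 else answer) := by
    funext answer tree
    rw [foldl_append_filter, altCheck_eq]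
    have hfn : skill.toList.contains = fun c => decide (c ∈ skill.toList) := by
      funext c; simp
    simp [hfn]
  rw [hfun]
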